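-- pv_equiv track=rewrite | github.com/lamkavan/cs-learning-2019 | Solutions/Homework2/Homework2_Solution.py | cap_ever_other_letter
-- ===== SOURCE A (Python) =====
-- def cap_ever_other_letter(str1):
--     str1_cap = ""
--     key = 1  # use this to determine if we should cap letter or not
--
--     for character in str1:
--         if key > 0:
--             str1_cap += character.upper()
--             key *= -1
--         else:
--             str1_cap += character
--             key *= -1
--
--     return str1_cap
-- ===== SOURCE B (Python) =====
-- def cap_ever_other_letter(str1):
--     evens = str1[::2].upper()
--     odds = str1[1::2]
--     return ''.join(c + o for c, o in zip(evens, odds)) + evens[len(odds):]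
-- ===== Notes on version B (the rewrite author's own statement) =====
-- stated objective: alternative
-- what changed: B splits the string into its two strided slices (str1[::2] uppercased, str1[1::2] unchanged) and rebuilds the result by zipping them, instead of A's single pass toggling a sign flag per character.
import Mathlib
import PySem

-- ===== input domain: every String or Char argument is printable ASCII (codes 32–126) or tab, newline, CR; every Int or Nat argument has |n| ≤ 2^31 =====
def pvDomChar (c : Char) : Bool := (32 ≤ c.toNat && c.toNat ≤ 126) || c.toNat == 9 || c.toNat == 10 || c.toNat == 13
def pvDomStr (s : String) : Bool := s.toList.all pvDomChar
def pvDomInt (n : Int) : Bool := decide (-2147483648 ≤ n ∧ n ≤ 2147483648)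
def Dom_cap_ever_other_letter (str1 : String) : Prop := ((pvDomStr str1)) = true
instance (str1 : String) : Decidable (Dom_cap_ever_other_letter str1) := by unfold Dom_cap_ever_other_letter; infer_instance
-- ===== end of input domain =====

-- B rebuilds the string from its two strided slices (str1[::2] uppercased and str1[1::2]) by zipping,
-- instead of A's single pass toggling a sign flag per character; proved equal on all inputs.

-- ===== PORT A =====
def cap_ever_other_letter (str1 : String) : String :=
  let r := str1.toList.foldl
    (fun (st : List Char × Int) character =>
      if st.2 > 0 then (st.1 ++ [PySem.Chars.upperChar character], st.2 * (-1))
      else (st.1 ++ [character], st.2 * (-1)))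
    ([], 1)
  String.ofList r.1

-- ===== PORT B =====
def cap_ever_other_letter_alt (str1 : String) : String :=
  let evens := PySem.Chars.upper ((PySem.Chars.slice? str1.toList none none 2).getD [])
  let odds := (PySem.Chars.slice? str1.toList (some 1) none 2).getD []
  String.ofList ((evens.zip odds).flatMap (fun p => [p.1, p.2])
    ++ PySem.List.slice evens (some (odds.length : Int)) none)

-- ===== PRECONDITION & SPEC =====
def Spec_cap_ever_other_letter (str1 : String) (out : String) : Prop := out = cap_ever_other_letter_alt str1
instance (str1 : String) (out : String) : Decidable (Spec_cap_ever_other_letter str1 out) := by unfold Spec_cap_ever_other_letter; infer_instance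

-- ===== CLAIM (what is proved, stated in full; the proofs are below) =====
def Claim_equal_cap_ever_other_letter : Prop := ∀ (str1 : String), Dom_cap_ever_other_letter str1 → Spec_cap_ever_other_letter str1 (cap_ever_other_letter str1)

-- ===== LEMMAS AND PROOFS =====

-- every other element of a list, starting with the first (what xs[::2] selects)
def eo {α : Type} : List α → List α
  | [] => []
  | [a] => [a]
  | a :: _ :: t => a :: eo t

theorem eo_cons {α : Type} (x : α) (r : List α) : eo (x :: r) = x :: eo r.tail := by
  cases r <;> rfl

theorem filt_eo {α : Type} (xs : List α) (c : ℕ) (hc : c = (xs.length + 1) / 2) :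
    List.filterMap (fun k : ℕ => xs[(2 * (k : ℤ)).toNat]?) (List.range c) = eo xs := by
  induction xs using eo.induct generalizing c with
  | case1 => subst hc; simp [eo]
  | case2 a => subst hc; simp [eo, List.range_succ]
  | case3 a b t ih =>
    rw [show c = (t.length + 1) / 2 + 1 by simp at hc; omega,
        List.range_succ_eq_map, List.filterMap_cons]
    norm_num
    have harg : (fun x : ℕ => (a :: b :: t)[(2 * ((x : ℤ) + 1)).toNat]?)
        = (fun x : ℕ => t[(2 * (x : ℤ)).toNat]?) := by
      funext x
      rw [show (2 * ((x : ℤ) + 1)).toNat = 2 * x + 2 by omega,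
          show (2 * (x : ℤ)).toNat = 2 * x by omega]
      rfl
    rw [harg, ih _ rfl]
    rfl

theorem slice2_eq_eo {α : Type} (xs : List α) : PySem.List.slice? xs none none 2 = some (eo xs) := by
  simp only [PySem.List.slice?, PySem.List.sliceIndices]
  norm_num
  rw [show (if 0 < xs.length then ((↑xs.length + 2 - 1 : ℤ) / 2).toNat else 0) = (xs.length + 1) / 2 by
        split_ifs <;> omega]
  exact filt_eo xs _ rfl

theorem slice2_tail_eq_eo {α : Type} (xs : List α) : PySem.List.slice? xs (some 1) none 2 = some (eo xs.tail) := by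
  cases xs with
  | nil => rfl
  | cons a r =>
    simp only [PySem.List.slice?, PySem.List.sliceIndices]
    norm_num
    rw [show (if 0 < r.length then ((↑r.length + 2 - 1 : ℤ) / 2).toNat else 0) = (r.length + 1) / 2 by
          split_ifs <;> omega,
        show (fun x : ℕ => (a :: r)[(1 + 2 * (x : ℤ)).toNat]?) = (fun x : ℕ => r[(2 * (x : ℤ)).toNat]?) by
          funext x
          rw [show (1 + 2 * (x : ℤ)).toNat = 2 * x + 1 by omega,
              show (2 * (x : ℤ)).toNat = 2 * x by omega]
          rfl]
    exact filt_eo r _ rfl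

-- A's toggling fold, characterised by the two strided subsequences
theorem foldA (l acc : List Char) :
    (List.foldl
      (fun (st : List Char × Int) character =>
        if st.2 > 0 then (st.1 ++ [PySem.Chars.upperChar character], st.2 * (-1))
        else (st.1 ++ [character], st.2 * (-1)))
      (acc, 1) l).1
    = acc ++ ((((eo l).map PySem.Chars.upperChar).zip (eo l.tail)).flatMap (fun p => [p.1, p.2])
        ++ ((eo l).map PySem.Chars.upperChar).drop (eo l.tail).length) := by
  induction l using eo.induct generalizing acc with
  | case1 => simp [eo]
  | case2 a => simp [eo]
  | case3 a b t ih =>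
    show (List.foldl _ (acc ++ [PySem.Chars.upperChar a] ++ [b], 1) t).1 = _
    rw [ih]
    rw [show eo (a :: b :: t) = a :: eo t from rfl,
        show (a :: b :: t).tail = b :: t from rfl, eo_cons]
    simp

-- ===== VERDICT (by name: the statement is the Claim_ definition above) =====
theorem cap_ever_other_letter_spec : Claim_equal_cap_ever_other_letter := by
  intro str1 _
  show cap_ever_other_letter str1 = cap_ever_other_letter_alt str1
  unfold cap_ever_other_letter cap_ever_other_letter_alt
  simp only [PySem.Chars.slice?_eq_listSlice?]
  rw [slice2_eq_eo, slice2_tail_eq_eo]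
  simp only [Option.getD_some, PySem.Chars.upper]
  rw [PySem.List.slice_from_natCast]
  rw [foldA]
  rfl
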